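-- pv_equiv track=rewrite | github.com/Rokasbarasa1/STM32-Quadcopter | tools/latest_tools/fix_gps_data.py | count_digits_before_after_decimal
-- ===== SOURCE A (Python) =====
-- def count_digits_before_after_decimal(value):
--     if '.' in value:
--         before_dec, after_dec = value.split('.', 1)
--     else:
--         before_dec, after_dec = value, ''
--     digits_before = sum(c.isdigit() for c in before_dec)
--     digits_after = sum(c.isdigit() for c in after_dec)
--     return digits_before, digits_after
-- ===== SOURCE B (Python) =====
-- def count_digits_before_after_decimal(value):
--     seen_dot = False
--     digits_before = 0
--     digits_after = 0
--     for c in value: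
--         if c == '.' and not seen_dot:
--             seen_dot = True
--         elif c.isdigit():
--             if seen_dot:
--                 digits_after += 1
--             else:
--                 digits_before += 1
--     return digits_before, digits_after
-- ===== Notes on version B (the rewrite author's own statement) =====
-- stated objective: simpler
-- what changed: Replaces split('.',1) plus two generator-sum scans with a single pass over the characters maintaining a seen-dot flag and two counters.
import Mathlib
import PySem

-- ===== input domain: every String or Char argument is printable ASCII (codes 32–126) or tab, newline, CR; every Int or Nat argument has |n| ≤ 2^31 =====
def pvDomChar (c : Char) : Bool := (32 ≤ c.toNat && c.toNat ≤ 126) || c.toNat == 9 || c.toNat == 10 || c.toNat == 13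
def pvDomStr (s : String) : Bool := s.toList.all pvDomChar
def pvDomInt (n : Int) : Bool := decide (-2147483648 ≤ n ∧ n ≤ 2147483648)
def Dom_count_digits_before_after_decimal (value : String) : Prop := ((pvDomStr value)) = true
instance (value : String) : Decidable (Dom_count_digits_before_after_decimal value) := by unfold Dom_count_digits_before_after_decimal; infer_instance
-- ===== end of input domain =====

-- B replaces A's split('.',1) plus two digit-sum scans by a single stateful pass (seen-dot flag, two counters); same O(n) cost, one pass instead of three.

-- ===== PORT A =====
-- A: split at the first '.' (if any), then sum c.isdigit() over each half.
def count_digits_before_after_decimal (value : String) : Int × Int :=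
  let cs := value.toList
  let p : List Char × List Char :=
    if PySem.Chars.isIn ['.'] cs then
      match PySem.Chars.splitMax? cs ['.'] 1 with
      | some (b :: a :: _) => (b, a)
      | _ => (cs, [])          -- unreachable: split('.',1) with '.' present yields two pieces
    else (cs, [])
  ((p.1.map (fun c => if PySem.Chars.isdigit c then (1 : Int) else 0)).sum,
   (p.2.map (fun c => if PySem.Chars.isdigit c then (1 : Int) else 0)).sum)

-- ===== PORT B =====
-- B: one pass; only the FIRST '.' flips the flag, digits increment the side the flag selects.
def pvAltGo : List Char → Bool → Int → Int → Int × Int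
  | [], _, b, a => (b, a)
  | c :: rest, seen, b, a =>
    if c == '.' && !seen then pvAltGo rest true b a
    else if PySem.Chars.isdigit c then
      (if seen then pvAltGo rest seen b (a + 1) else pvAltGo rest seen (b + 1) a)
    else pvAltGo rest seen b a

def count_digits_before_after_decimal_alt (value : String) : Int × Int :=
  pvAltGo value.toList false 0 0

-- ===== PRECONDITION & SPEC =====
def Spec_count_digits_before_after_decimal (value : String) (out : Int × Int) : Prop := out = count_digits_before_after_decimal_alt value
instance (value : String) (out : Int × Int) : Decidable (Spec_count_digits_before_after_decimal value out) := by unfold Spec_count_digits_before_after_decimal; infer_instance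

-- ===== CLAIM (what is proved, stated in full; the proofs are below) =====
def Claim_equal_count_digits_before_after_decimal : Prop := ∀ (value : String), Dom_count_digits_before_after_decimal value → Spec_count_digits_before_after_decimal value (count_digits_before_after_decimal value)

-- ===== LEMMAS AND PROOFS =====

-- digit count of a character list, the value A's generator sums compute
def pvDC (l : List Char) : Int :=
  (l.map (fun c => if PySem.Chars.isdigit c then (1 : Int) else 0)).sum

theorem pvIsIn_singleton (c : Char) (l : List Char) :
    PySem.Chars.isIn [c] l = true ↔ c ∈ l := by
  rw [PySem.Chars.isIn_iff_infix]
  constructor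
  · rintro ⟨s, t, rfl⟩; simp
  · intro h
    obtain ⟨s, t, rfl⟩ := List.append_of_mem h
    exact ⟨s, t, by simp⟩

-- once the (single) split has happened, go just flushes the rest as the last piece
theorem pvGo_zero (fuel : Nat) (l cur : List Char) (accs : List (List Char)) :
    PySem.Chars.splitOnMax.go ['.'] fuel 0 l cur accs = ((cur.reverse ++ l) :: accs).reverse := by
  cases fuel with
  | zero => rfl
  | succ n => cases l with
    | nil => simp [PySem.Chars.splitOnMax.go]
    | cons c rest => simp [PySem.Chars.splitOnMax.go]

-- characterisation of split('.', 1) on a character list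
theorem pvGo_one (l : List Char) : ∀ (fuel : Nat) (cur : List Char) (accs : List (List Char)),
    l.length < fuel →
    PySem.Chars.splitOnMax.go ['.'] fuel 1 l cur accs =
      (if '.' ∈ l then
        ((l.dropWhile (· ≠ '.')).tail :: (cur.reverse ++ l.takeWhile (· ≠ '.')) :: accs).reverse
      else ((cur.reverse ++ l) :: accs).reverse) := by
  induction l with
  | nil =>
    intro fuel cur accs h
    cases fuel with
    | zero => omega
    | succ n => simp [PySem.Chars.splitOnMax.go]
  | cons c rest ih =>
    intro fuel cur accs h
    cases fuel with
    | zero => omega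
    | succ n =>
      by_cases hc : c = '.'
      · subst hc
        have hpre : List.isPrefixOf ['.'] ('.' :: rest) = true := by
          simp [List.isPrefixOf]
        simp only [PySem.Chars.splitOnMax.go, hpre]
        rw [pvGo_zero]
        simp [List.takeWhile, List.dropWhile]
      · have hpre : List.isPrefixOf ['.'] (c :: rest) = false := by
          simp only [List.isPrefixOf, Bool.and_true]
          exact decide_eq_false (fun h => hc h.symm)
        simp only [PySem.Chars.splitOnMax.go, hpre]
        rw [ih n (c :: cur) accs (by simpa using Nat.lt_of_succ_lt_succ h)]
        by_cases hm : '.' ∈ rest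
        · simp [hm, hc, Ne.symm hc, List.takeWhile, List.dropWhile]
        · simp [hm, Ne.symm hc]

-- B with the flag set counts every remaining digit into the second component
theorem pvAltGo_true (l : List Char) : ∀ (b a : Int),
    pvAltGo l true b a = (b, a + pvDC l) := by
  induction l with
  | nil => intro b a; simp [pvAltGo, pvDC]
  | cons c rest ih =>
    intro b a
    by_cases hd : PySem.Chars.isdigit c
    · simp [pvAltGo, hd, ih, pvDC]; ring
    · simp [pvAltGo, hd, ih, pvDC]

-- B with the flag clear: digits before the first '.' go left, the rest right
theorem pvAltGo_false (l : List Char) : ∀ (b a : Int),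
    pvAltGo l false b a =
      (if '.' ∈ l then
        (b + pvDC (l.takeWhile (· ≠ '.')), a + pvDC ((l.dropWhile (· ≠ '.')).tail))
      else (b + pvDC l, a)) := by
  induction l with
  | nil => intro b a; simp [pvAltGo, pvDC]
  | cons c rest ih =>
    intro b a
    by_cases hc : c = '.'
    · subst hc
      simp [pvAltGo, pvAltGo_true, List.takeWhile, List.dropWhile, pvDC]
    · by_cases hd : PySem.Chars.isdigit c
      · by_cases hm : '.' ∈ rest
        · simp [pvAltGo, hc, hd, ih, hm, Ne.symm hc, List.takeWhile, List.dropWhile, pvDC]; ring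
        · simp [pvAltGo, hc, hd, ih, hm, Ne.symm hc, pvDC]; ring
      · by_cases hm : '.' ∈ rest
        · simp [pvAltGo, hc, hd, ih, hm, Ne.symm hc, List.takeWhile, List.dropWhile, pvDC]
        · simp [pvAltGo, hc, hd, ih, hm, Ne.symm hc, pvDC]

-- ===== VERDICT (by name: the statement is the Claim_ definition above) =====
theorem count_digits_before_after_decimal_spec : Claim_equal_count_digits_before_after_decimal := by
  intro value _
  unfold Spec_count_digits_before_after_decimal
  unfold count_digits_before_after_decimal count_digits_before_after_decimal_alt
  set cs := value.toList with hcs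
  by_cases hm : '.' ∈ cs
  · have hin : PySem.Chars.isIn ['.'] cs = true := (pvIsIn_singleton _ _).mpr hm
    have hsplit : PySem.Chars.splitMax? cs ['.'] 1 =
        some [cs.takeWhile (· ≠ '.'), (cs.dropWhile (· ≠ '.')).tail] := by
      unfold PySem.Chars.splitMax? PySem.Chars.splitOnMax
      norm_num
      rw [pvGo_one cs (cs.length + 1) [] [] (by omega)]
      simp [hm]
    rw [pvAltGo_false]
    simp [hin, hsplit, hm, pvDC]
  · have hin : PySem.Chars.isIn ['.'] cs = false := by
      cases h : PySem.Chars.isIn ['.'] cs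
      · rfl
      · exact absurd ((pvIsIn_singleton _ _).mp h) hm
    rw [pvAltGo_false]
    simp [hin, hm, pvDC]
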